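-- pv_equiv track=rewrite | github.com/ArcProjet/ARC | primitive.py | extendColumn25_7
-- ===== SOURCE A (Python) =====
-- def gridCopy(grid):
--     res = [[0 for _ in range(len(grid[0]))] for _ in range(len(grid))]
--     for i in range(0, len(grid)):
--         for j in range(0, len(grid[i])):
--             res[i][j] = grid[i][j]
--     return res
--
-- def extendColumn25_7(grid):
--  res = gridCopy(grid)
--  column = int((len(res[0])-1)*0.25)
--  for i in range(0, len(res)):
--    for j in range(0, len(res[0])):
--        if(j == column):
--          res[i][j] = 7
--  return res
-- ===== SOURCE B (Python) =====
-- def extendColumn25_7(grid):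
--     w = len(grid[0])
--     if w == 0:
--         return [[] for _ in grid]
--     cols = [[row[j] if j < len(row) else 0 for row in grid] for j in range(w)]
--     cols[(w - 1) // 4] = [7] * len(grid)
--     return [list(t) for t in zip(*cols)]
-- ===== Notes on version B (the rewrite author's own statement) =====
-- stated objective: alternative
-- what changed: A copies the grid cell by cell into a zero grid and then rescans every cell with an `if j == column` test; B works column-wise instead: it builds the padded transpose (a list of columns), replaces the marked column wholesale with a row of sevens, and transposes back with zip.
import Mathlib
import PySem

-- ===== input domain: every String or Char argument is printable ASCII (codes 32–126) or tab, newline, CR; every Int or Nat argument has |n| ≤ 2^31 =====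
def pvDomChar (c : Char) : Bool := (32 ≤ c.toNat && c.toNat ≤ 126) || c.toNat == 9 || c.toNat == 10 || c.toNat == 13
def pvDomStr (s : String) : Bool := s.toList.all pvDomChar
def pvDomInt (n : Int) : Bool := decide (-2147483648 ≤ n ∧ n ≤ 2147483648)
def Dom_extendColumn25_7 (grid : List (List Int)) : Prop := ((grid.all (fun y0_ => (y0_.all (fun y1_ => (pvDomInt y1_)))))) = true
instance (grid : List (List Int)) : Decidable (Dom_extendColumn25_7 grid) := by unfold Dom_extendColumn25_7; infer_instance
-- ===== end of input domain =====

-- B is a column-wise alternative of the same cost: it builds the padded transpose, replaces the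
-- marked column wholesale with a row of sevens, and transposes back (objective: alternative).

-- ===== PORT A =====
-- res = [[0]*len(grid[0]) for _ in range(len(grid))]; res[i][j] = grid[i][j]
def pvGridCopy (grid : List (List Int)) : List (List Int) :=
  let res := (List.range grid.length).map (fun _ => List.replicate (grid.headD []).length (0 : Int))
  (List.range grid.length).foldl (fun res i =>
    (List.range (grid.getD i []).length).foldl
      (fun res j => res.set i ((res.getD i []).set j ((grid.getD i []).getD j 0))) res) res

def extendColumn25_7 (grid : List (List Int)) : List (List Int) :=
  let res := pvGridCopy grid
  -- int((len(res[0])-1)*0.25): exact, since (w-1)*0.25 is an exact binary float and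
  -- int() truncates toward zero — i.e. truncating division of w-1 by 4
  let column : Int := (((res.headD []).length : Int) - 1).tdiv 4
  (List.range res.length).foldl (fun res i =>
    (List.range (res.headD []).length).foldl
      (fun res (j : ℕ) => if (j : Int) = column then res.set i ((res.getD i []).set j 7) else res) res) res

-- ===== PORT B =====
def extendColumn25_7_alt (grid : List (List Int)) : List (List Int) :=
  let w := (grid.headD []).length
  if w = 0 then grid.map (fun _ => ([] : List Int))
  else
    -- cols = [[row[j] if j < len(row) else 0 for row in grid] for j in range(w)]
    let cols := (List.range w).map (fun j =>
      grid.map (fun row => if j < row.length then row.getD j 0 else 0))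
    -- cols[(w-1)//4] = [7]*len(grid)
    let cols := cols.set ((w - 1) / 4) (List.replicate grid.length (7 : Int))
    -- [list(t) for t in zip(*cols)]: zip truncates to the shortest column's length
    let n := ((cols.map List.length).min?).getD 0
    (List.range n).map (fun i => cols.map (fun c => c.getD i 0))

-- ===== PRECONDITION & SPEC =====
-- A raises IndexError on the empty grid (grid[0]) and whenever some row is longer than the
-- first row (gridCopy writes past the end of a width-len(grid[0]) result row); Pre_ excludes exactly those.
def Pre_extendColumn25_7 (grid : List (List Int)) : Prop :=
  grid ≠ [] ∧ ∀ row ∈ grid, row.length ≤ (grid.headD []).length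
instance (grid : List (List Int)) : Decidable (Pre_extendColumn25_7 grid) := by
  unfold Pre_extendColumn25_7; infer_instance
def pvWitness_extendColumn25_7 : List (List Int) := [[1, 2, 3, 4, 5], [6, 7, 8], []]

def Spec_extendColumn25_7 (grid : List (List Int)) (out : List (List Int)) : Prop := out = extendColumn25_7_alt grid
instance (grid : List (List Int)) (out : List (List Int)) : Decidable (Spec_extendColumn25_7 grid out) := by unfold Spec_extendColumn25_7; infer_instance

-- ===== CLAIM (what is proved, stated in full; the proofs are below) =====
def Claim_equal_extendColumn25_7 : Prop := ∀ (grid : List (List Int)), Dom_extendColumn25_7 grid → Pre_extendColumn25_7 grid → Spec_extendColumn25_7 grid (extendColumn25_7 grid)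

-- ===== LEMMAS AND PROOFS =====

-- reading position n of a length-n prefix glued to res.drop n gives res's own entry n
theorem pv_getD_at (pre res : List (List Int)) (n : ℕ) (hl : pre.length = n) :
    (pre ++ res.drop n).getD n [] = res.getD n [] := by
  simp [List.getD, List.getElem?_append_right (by omega : pre.length ≤ n), hl, List.getElem?_drop]

-- setting position n of a length-n prefix glued to res.drop n replaces the head of the tail
theorem pv_set_at (pre res : List (List Int)) (n : ℕ) (x : List Int)
    (hl : pre.length = n) (h : n < res.length) :
    (pre ++ res.drop n).set n x = pre ++ x :: res.drop (n + 1) := by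
  rw [List.set_append, if_neg (by omega), hl]
  have h0 : n - n = 0 := by omega
  rw [h0, List.drop_eq_getElem_cons (by omega : n < res.length), List.set_cons_zero]

-- the by-cell writes of a fixed row i collapse to a single row update
theorem pv_inner_copy (i : ℕ) (v : ℕ → Int) (js : List ℕ) (res : List (List Int))
    (hi : i < res.length) :
    js.foldl (fun res j => res.set i ((res.getD i []).set j (v j))) res
      = res.set i (js.foldl (fun r j => r.set j (v j)) (res.getD i [])) := by
  induction js generalizing res with
  | nil => simp [hi]
  | cons j js ih =>
    simp only [List.foldl_cons]
    rw [ih _ (by simpa using hi)]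
    simp [List.getD, List.getElem?_set_self (by simpa using hi), List.set_set]

-- writing g's entries into r cell by cell yields g's prefix followed by r's tail
theorem pv_row_copy (g : List Int) : ∀ (n : ℕ) (r : List Int), n ≤ g.length → n ≤ r.length →
    (List.range n).foldl (fun r j => r.set j (g.getD j 0)) r = g.take n ++ r.drop n := by
  intro n
  induction n with
  | zero => simp
  | succ n ih =>
    intro r hg hr
    rw [List.range_succ, List.foldl_append, ih r (by omega) (by omega)]
    simp only [List.foldl_cons, List.foldl_nil]
    rw [List.set_append]
    have hlen : (g.take n).length = n := by simp; omega
    rw [if_neg (by omega), hlen]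
    have h0 : n - n = 0 := by omega
    rw [h0, List.drop_eq_getElem_cons (by omega : n < r.length), List.set_cons_zero]
    have htk : g.take (n + 1) = g.take n ++ [g[n]] := by
      rw [← List.take_concat_get (by omega : n < g.length), List.concat_eq_append]
      rfl
    have hgd : g.getD n 0 = g[n] := List.getD_eq_getElem g 0 (by omega)
    rw [hgd, htk, List.append_assoc, List.singleton_append]

-- A's first nested loop: one row-replacing pass over the row indices
theorem pv_copy_outer (g : ℕ → List Int) :
    ∀ (n : ℕ) (res : List (List Int)), n ≤ res.length →
    (List.range n).foldl (fun res i =>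
        (List.range (g i).length).foldl
          (fun res j => res.set i ((res.getD i []).set j ((g i).getD j 0))) res) res
      = (List.range n).map (fun i =>
          (List.range (g i).length).foldl (fun r j => r.set j ((g i).getD j 0)) (res.getD i []))
        ++ res.drop n := by
  intro n
  induction n with
  | zero => simp
  | succ n ih =>
    intro res h
    rw [List.range_succ, List.foldl_append, ih res (by omega)]
    simp only [List.foldl_cons, List.foldl_nil]
    set pre := (List.range n).map (fun i =>
      (List.range (g i).length).foldl (fun r j => r.set j ((g i).getD j 0)) (res.getD i []))
      with hpre
    have hl : pre.length = n := by simp [hpre]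
    have hlen : (pre ++ res.drop n).length = res.length := by simp [hl]; omega
    rw [pv_inner_copy n _ _ _ (by omega : n < (pre ++ res.drop n).length)]
    rw [pv_getD_at pre res n hl, pv_set_at pre res n _ hl (by omega)]
    rw [List.map_append, ← hpre, List.append_assoc, List.map_singleton, List.singleton_append]

-- the if-guarded inner scan of A's second loop writes only at column cn
theorem pv_inner_seven (i cn : ℕ) :
    ∀ (n : ℕ) (res : List (List Int)),
    (List.range n).foldl
        (fun res (j : ℕ) => if (j : Int) = (cn : Int) then res.set i ((res.getD i []).set j 7) else res) res
      = if cn < n then res.set i ((res.getD i []).set cn 7) else res := by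
  intro n
  induction n with
  | zero => simp
  | succ n ih =>
    intro res
    rw [List.range_succ, List.foldl_append, ih res]
    by_cases h : cn < n
    · rw [if_pos h]
      simp only [List.foldl_cons, List.foldl_nil]
      rw [if_neg (by exact_mod_cast (by omega : ¬ ((n : Int) = (cn : Int))))]
      rw [if_pos (by omega)]
    · by_cases h2 : cn = n
      · subst h2
        rw [if_neg h]
        simp only [List.foldl_cons, List.foldl_nil]
        rw [if_pos trivial, if_pos (by omega)]
      · rw [if_neg h]
        simp only [List.foldl_cons, List.foldl_nil]
        rw [if_neg (by exact_mod_cast (by omega : ¬ ((n : Int) = (cn : Int)))), if_neg (by omega)]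

-- A's second nested loop: per row, set column cn iff it is within the first row's width
theorem pv_pass2 (cn : ℕ) :
    ∀ (n : ℕ) (res : List (List Int)), n ≤ res.length →
    (List.range n).foldl (fun res i =>
        (List.range (res.headD []).length).foldl
          (fun res (j : ℕ) => if (j : Int) = (cn : Int) then res.set i ((res.getD i []).set j 7) else res) res) res
      = (List.range n).map (fun i =>
          if cn < (res.headD []).length then (res.getD i []).set cn 7 else res.getD i [])
        ++ res.drop n := by
  intro n
  induction n with
  | zero => simp
  | succ n ih =>
    intro res h
    rw [List.range_succ, List.foldl_append, ih res (by omega)]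
    simp only [List.foldl_cons, List.foldl_nil]
    set pre := (List.range n).map (fun i =>
      if cn < (res.headD []).length then (res.getD i []).set cn 7 else res.getD i []) with hpre
    have hl : pre.length = n := by simp [hpre]
    have hhead : ((pre ++ res.drop n).headD []).length = (res.headD []).length := by
      cases n with
      | zero => simp [hpre]
      | succ k =>
        obtain ⟨a, t, rfl⟩ : ∃ a t, res = a :: t := by
          cases res with
          | nil => simp at h
          | cons a t => exact ⟨a, t, rfl⟩
        simp only [hpre, List.range_succ_eq_map, List.map_cons, List.cons_append,
          List.headD_cons]
        split <;> simp [List.getD]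
    rw [hhead, pv_inner_seven]
    by_cases hc : cn < (res.headD []).length
    · rw [if_pos hc]
      rw [pv_getD_at pre res n hl, pv_set_at pre res n _ hl (by omega)]
      rw [List.map_append, ← hpre, List.append_assoc, List.map_singleton, if_pos hc,
        List.singleton_append]
    · rw [if_neg hc, List.map_append, ← hpre, List.append_assoc, List.map_singleton,
        if_neg hc, List.singleton_append]
      rw [List.drop_eq_getElem_cons (by omega : n < res.length)]
      rw [List.getD_eq_getElem res [] (by omega : n < res.length)]

-- mapping over the indices of l equals mapping over l
theorem pv_map_range_getD (f : List Int → List Int) :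
    ∀ (l : List (List Int)), (List.range l.length).map (fun i => f (l.getD i [])) = l.map f := by
  intro l
  induction l with
  | nil => simp
  | cons h t ih =>
    simp only [List.length_cons, List.range_succ_eq_map, List.map_cons, List.map_map]
    exact congrArg _ (by simpa [Function.comp] using ih)

-- gridCopy returns each row zero-padded to the first row's width
theorem pv_gridCopy_eq (grid : List (List Int))
    (hle : ∀ row ∈ grid, row.length ≤ (grid.headD []).length) :
    pvGridCopy grid
      = grid.map (fun row =>
          row ++ List.replicate ((grid.headD []).length - row.length) (0 : Int)) := by
  unfold pvGridCopy
  set w := (grid.headD []).length with hw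
  set res0 := (List.range grid.length).map (fun _ => List.replicate w (0 : Int)) with hres0
  have hlen0 : res0.length = grid.length := by simp [hres0]
  rw [pv_copy_outer (fun i => grid.getD i []) grid.length res0 (by omega)]
  rw [List.drop_eq_nil_of_le (by omega), List.append_nil]
  have hstep : ∀ i ∈ List.range grid.length,
      (List.range (grid.getD i []).length).foldl
          (fun r j => r.set j ((grid.getD i []).getD j 0)) (res0.getD i [])
        = (fun row => row ++ List.replicate (w - row.length) (0 : Int)) (grid.getD i []) := by
    intro i hi
    rw [List.mem_range] at hi
    have hget0 : res0.getD i [] = List.replicate w (0 : Int) := by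
      simp [hres0, List.getD, hi]
    have hmem : grid.getD i [] ∈ grid := by
      rw [List.getD_eq_getElem grid [] hi]
      exact List.getElem_mem _
    have hm : (grid.getD i []).length ≤ w := hle _ hmem
    rw [hget0, pv_row_copy _ _ _ (le_refl _) (by rw [List.length_replicate]; exact hm)]
    simp [List.drop_replicate]
  rw [List.map_congr_left hstep]
  exact pv_map_range_getD (fun row => row ++ List.replicate (w - row.length) (0 : Int)) grid

-- the canonical value both ports compute on Pre_
def pvCanon (grid : List (List Int)) : List (List Int) :=
  let w := (grid.headD []).length
  if w = 0 then grid.map (fun _ => ([] : List Int))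
  else grid.map (fun row =>
    (row ++ List.replicate (w - row.length) (0 : Int)).set ((w - 1) / 4) 7)

-- A equals the canonical value on Pre_
theorem pvA_canon (grid : List (List Int)) (hne : grid ≠ [])
    (hle : ∀ row ∈ grid, row.length ≤ (grid.headD []).length) :
    extendColumn25_7 grid = pvCanon grid := by
  simp only [extendColumn25_7, pvCanon]
  set w := (grid.headD []).length with hw
  have hGC := pv_gridCopy_eq grid hle
  rw [hGC]
  set GC := grid.map (fun row => row ++ List.replicate (w - row.length) (0 : Int)) with hGCdef
  obtain ⟨h0, t, rfl⟩ : ∃ h0 t, grid = h0 :: t := by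
    cases grid with
    | nil => exact absurd rfl hne
    | cons a t => exact ⟨a, t, rfl⟩
  set grid := h0 :: t with hgrid
  have hGChead : (GC.headD []).length = w := by
    simp only [hGCdef, hgrid, List.map_cons, List.headD_cons, List.length_append,
      List.length_replicate]
    have : h0.length ≤ w := hle h0 (by simp [hgrid])
    simp only [hw, hgrid, List.headD_cons]
    omega
  have hGClen : GC.length = grid.length := by simp [hGCdef]
  by_cases hw0 : w = 0
  · -- every row is empty; A's second loop scans no columns
    have hcol : (((GC.headD []).length : Int) - 1).tdiv 4 = ((0 : ℕ) : Int) := by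
      rw [hGChead, hw0]; decide
    rw [hcol, pv_pass2 0 GC.length GC (le_refl _), hGChead]
    rw [List.drop_eq_nil_of_le (le_refl GC.length), List.append_nil]
    rw [if_pos hw0]
    have hif : ∀ i ∈ List.range GC.length,
        (if 0 < w then (GC.getD i []).set 0 7 else GC.getD i []) = GC.getD i [] := by
      intro i _
      rw [if_neg (by omega)]
    rw [List.map_congr_left hif]
    have hid : (List.range GC.length).map (fun i => GC.getD i []) = GC.map (fun row => row) :=
      pv_map_range_getD (fun row => row) GC
    rw [hid, List.map_id', hGCdef]
    apply List.map_congr_left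
    intro row hrow
    have hr0 : row = [] := List.eq_nil_of_length_eq_zero (by have := hle row hrow; omega)
    simp [hr0, hw0]
  · -- w ≥ 1: the marked column is cn = (w-1)/4 < w
    set cn := (w - 1) / 4 with hcn
    have hcast : ((w : Int) - 1) = (((w - 1 : ℕ)) : Int) := by omega
    have hcol : (((GC.headD []).length : Int) - 1).tdiv 4 = ((cn : ℕ) : Int) := by
      rw [hGChead, hcast, Int.tdiv_eq_ediv_of_nonneg (by positivity)]
      exact_mod_cast rfl
    have hcnw : cn < w := by
      have := Nat.div_le_self (w - 1) 4
      omega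
    rw [hcol, pv_pass2 cn GC.length GC (le_refl _), hGChead]
    rw [List.drop_eq_nil_of_le (le_refl GC.length), List.append_nil]
    rw [if_neg hw0]
    have hif : ∀ i ∈ List.range GC.length,
        (if cn < w then (GC.getD i []).set cn 7 else GC.getD i []) = (GC.getD i []).set cn 7 := by
      intro i _
      rw [if_pos hcnw]
    rw [List.map_congr_left hif]
    have hmaps : (List.range GC.length).map (fun i => (GC.getD i []).set cn 7)
        = GC.map (fun row => row.set cn 7) := pv_map_range_getD (fun row => row.set cn 7) GC
    rw [hmaps, hGCdef, List.map_map]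
    rfl

-- the minimum of a nonempty constant list is that constant
theorem pv_min_replicate (L w : ℕ) (hw : w ≠ 0) : ((List.replicate w L).min?).getD 0 = L := by
  obtain ⟨k, rfl⟩ : ∃ k, w = k + 1 := ⟨w - 1, by omega⟩
  have hf : ∀ m, List.foldl min L (List.replicate m L) = L := by
    intro m
    induction m with
    | zero => rfl
    | succ m ih => simpa [List.replicate_succ, min_self] using ih
  rw [show List.replicate (k + 1) L = L :: List.replicate k L from rfl, List.min?_cons', hf]
  rfl

-- a range-indexed padded read equals the zero-padded row
theorem pv_padded_read (row : List Int) (w : ℕ) (hle : row.length ≤ w) :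
    (List.range w).map (fun j => if j < row.length then row.getD j 0 else 0)
      = row ++ List.replicate (w - row.length) (0 : Int) := by
  apply List.ext_getElem
  · simp; omega
  · intro j hj hj'
    simp only [List.getElem_map, List.getElem_range]
    by_cases h : j < row.length
    · rw [if_pos h, List.getElem_append_left h, List.getD_eq_getElem row 0 h]
    · rw [if_neg h, List.getElem_append_right (by omega)]
      simp

-- B equals the canonical value on Pre_
theorem pvB_canon (grid : List (List Int)) (hne : grid ≠ [])
    (hle : ∀ row ∈ grid, row.length ≤ (grid.headD []).length) :
    extendColumn25_7_alt grid = pvCanon grid := by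
  simp only [extendColumn25_7_alt, pvCanon]
  set w := (grid.headD []).length with hw
  by_cases hw0 : w = 0
  · rw [if_pos hw0, if_pos hw0]
  · rw [if_neg hw0, if_neg hw0]
    set L := grid.length with hL
    set cn := (w - 1) / 4 with hcn
    have hcnw : cn < w := by
      have := Nat.div_le_self (w - 1) 4
      omega
    set cols0 := (List.range w).map (fun j =>
      grid.map (fun row => if j < row.length then row.getD j 0 else 0)) with hcols0
    set cols := cols0.set cn (List.replicate L (7 : Int)) with hcols
    -- every column has length L, so zip runs over exactly L rows
    have hlens : cols.map List.length = List.replicate w L := by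
      rw [hcols, List.map_set, hcols0, List.map_map]
      have : (List.length ∘ fun j =>
          grid.map (fun row => if j < row.length then row.getD j 0 else 0))
          = fun _ => L := by
        funext j; simp [hL]
      rw [this, List.length_replicate]
      rw [List.map_const', List.length_range, List.set_replicate_self]
    have hn : ((cols.map List.length).min?).getD 0 = L := by
      rw [hlens]
      exact pv_min_replicate L w hw0
    rw [hn]
    -- row i of the zipped result is the canonical row for grid[i]
    have hrow : ∀ i ∈ List.range L,
        cols.map (fun c => c.getD i 0)
          = (fun row => (row ++ List.replicate (w - row.length) (0 : Int)).set cn 7)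
              (grid.getD i []) := by
      intro i hi
      rw [List.mem_range] at hi
      rw [hcols, List.map_set, hcols0, List.map_map]
      have h7 : (List.replicate L (7 : Int)).getD i 0 = 7 := by
        simp [List.getD, hi]
      rw [h7]
      have hcol : ((fun c => c.getD i (0 : Int)) ∘ fun j =>
          grid.map (fun row => if j < row.length then row.getD j 0 else 0))
          = fun j => if j < (grid.getD i []).length then (grid.getD i []).getD j 0 else 0 := by
        funext j
        simp only [Function.comp]
        rw [List.getD, List.getElem?_map, List.getElem?_eq_getElem (by omega : i < grid.length)]
        simp [List.getD, List.getElem?_eq_getElem (by omega : i < grid.length)]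
      rw [hcol]
      have hmem : grid.getD i [] ∈ grid := by
        rw [List.getD_eq_getElem grid [] (by omega)]
        exact List.getElem_mem _
      rw [pv_padded_read _ w (hle _ hmem)]
    rw [List.map_congr_left hrow]
    have := pv_map_range_getD
      (fun row => (row ++ List.replicate (w - row.length) (0 : Int)).set cn 7) grid
    rw [hL]
    exact this

-- ===== VERDICT (by name: the statement is the Claim_ definition above) =====
theorem extendColumn25_7_spec : Claim_equal_extendColumn25_7 := by
  intro grid _ hpre
  obtain ⟨hne, hle⟩ := hpre
  simp only [Spec_extendColumn25_7]
  rw [pvA_canon grid hne hle, pvB_canon grid hne hle]
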